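-- pv_equiv track=rewrite | github.com/popzol/spopzol-MH4Ultimate-Randomizer | Scripts/customArcRepacker.py | extract_json_object_by_key
-- ===== SOURCE A (Python) =====
-- def extract_json_object_by_key(text, key):
--     """
--     Given text that may contain other junk, extract the JSON object starting at the
--     key (e.g. "questOrderInMemory") by finding the opening '{' after the key and
--     matching braces. Returns the substring or raises ValueError.
--     """
--     idx = text.find(key)
--     if idx == -1:
--         raise ValueError("key not found in text")
--     # find the first '{' after the key
--     brace_idx = text.find('{', idx)
--     if brace_idx == -1:
--         raise ValueError("opening brace not found after key")
--     depth = 0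
--     for i in range(brace_idx, len(text)):
--         c = text[i]
--         if c == '{':
--             depth += 1
--         elif c == '}':
--             depth -= 1
--             if depth == 0:
--                 return text[brace_idx:i+1]
--     raise ValueError("matching closing brace not found")
-- ===== SOURCE B (Python) =====
-- def _match_object(text, i):
--     """text[i] == '{'; return the index of the matching '}' by recursive descent."""
--     j = i + 1
--     n = len(text)
--     while j < n:
--         c = text[j]
--         if c == '{':
--             j = _match_object(text, j) + 1
--         elif c == '}':
--             return j
--         else:
--             j += 1
--     raise ValueError("matching closing brace not found")
--
--
-- def extract_json_object_by_key(text, key):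
--     idx = text.find(key)
--     if idx == -1:
--         raise ValueError("key not found in text")
--     brace_idx = text.find('{', idx)
--     if brace_idx == -1:
--         raise ValueError("opening brace not found after key")
--     return text[brace_idx:_match_object(text, brace_idx) + 1]
-- ===== Notes on version B (the rewrite author's own statement) =====
-- stated objective: alternative
-- what changed: The flat depth-counter scan is replaced by a recursive-descent brace matcher: a helper that, given the position of a '{', walks forward and recursively skips each nested object wholesale, returning the index of the matching '}'.
import Mathlib
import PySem

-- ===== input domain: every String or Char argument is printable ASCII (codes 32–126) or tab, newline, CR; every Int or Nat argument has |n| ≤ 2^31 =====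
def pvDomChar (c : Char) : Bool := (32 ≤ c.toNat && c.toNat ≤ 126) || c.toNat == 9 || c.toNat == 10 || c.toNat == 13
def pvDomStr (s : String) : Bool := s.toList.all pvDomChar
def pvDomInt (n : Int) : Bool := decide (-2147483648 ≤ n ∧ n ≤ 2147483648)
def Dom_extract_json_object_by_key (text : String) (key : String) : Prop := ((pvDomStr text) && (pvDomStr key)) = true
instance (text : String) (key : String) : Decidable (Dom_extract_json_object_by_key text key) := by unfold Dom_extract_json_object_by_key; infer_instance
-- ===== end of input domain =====

-- B replaces A's flat depth-counter loop by a recursive-descent brace matcher (a recursion that skips each nested object wholesale); objective: alternative decomposition, same cost.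
-- Where the Python raises ValueError both A and B raise identically; the ports return "" there and Pre_ excludes those inputs.

-- ===== PORT A =====
-- the for-loop of A: scans the suffix starting at the first brace with a running depth counter;
-- returns the offset (from the scan start) of the position where depth first returns to 0.
def pvLoopA : List Char → Int → Option Nat
  | [], _ => none
  | c :: rest, depth =>
    if c = '{' then (pvLoopA rest (depth + 1)).map (· + 1)
    else if c = '}' then
      if depth - 1 = 0 then some 0
      else (pvLoopA rest (depth - 1)).map (· + 1)
    else (pvLoopA rest depth).map (· + 1)

def extract_json_object_by_key (text : String) (key : String) : String :=
  let cs := text.toList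
  let idx := PySem.Chars.find cs key.toList
  if idx = -1 then ""            -- Python: raise ValueError("key not found in text")
  else
    let brace := PySem.Chars.findFrom cs ['{'] idx none
    if brace = -1 then ""        -- Python: raise ValueError("opening brace not found after key")
    else
      match pvLoopA (cs.drop brace.toNat) 0 with
      | some off => String.ofList (PySem.List.slice cs (some brace) (some (brace + (off : Int) + 1)))
      | none => ""               -- Python: raise ValueError("matching closing brace not found")

-- ===== PORT B =====
-- recursive-descent matcher (_match_object of Source B): l is the text just after an opening '{';
-- returns the offset in l of the matching '}' (on '{' it recurses to skip the nested object).
def pvMatchLen : List Char → Option Nat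
  | [] => none                   -- Python: raise ValueError("matching closing brace not found")
  | c :: rest =>
    if c = '}' then some 0
    else if c = '{' then
      match pvMatchLen rest with
      | none => none
      | some k =>
        match pvMatchLen (rest.drop (k + 1)) with
        | none => none
        | some k' => some (k + k' + 2)
    else
      match pvMatchLen rest with
      | none => none
      | some k => some (k + 1)
termination_by l => l.length
decreasing_by all_goals simp [List.length_drop]

def extract_json_object_by_key_alt (text : String) (key : String) : String :=
  let cs := text.toList
  let idx := PySem.Chars.find cs key.toList
  if idx = -1 then ""            -- Python: raise ValueError("key not found in text")
  else
    let brace := PySem.Chars.findFrom cs ['{'] idx none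
    if brace = -1 then ""        -- Python: raise ValueError("opening brace not found after key")
    else
      match pvMatchLen (cs.drop (brace.toNat + 1)) with
      | some k => String.ofList (PySem.List.slice cs (some brace) (some (brace + (k : Int) + 2)))
      | none => ""

-- ===== PRECONDITION & SPEC =====
-- Pre_ admits exactly the inputs where Python A returns: the key occurs, a '{' follows it,
-- and from that brace some position balances the '{'/'}' counts (a matching close exists).
def Pre_extract_json_object_by_key (text : String) (key : String) : Prop :=
  let cs := text.toList
  let idx := PySem.Chars.find cs key.toList
  let brace := PySem.Chars.findFrom cs ['{'] idx none
  idx ≠ -1 ∧ brace ≠ -1 ∧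
  ∃ j < cs.length, brace.toNat ≤ j ∧
    ((cs.take (j + 1)).drop brace.toNat).count '{' = ((cs.take (j + 1)).drop brace.toNat).count '}'
instance (text : String) (key : String) : Decidable (Pre_extract_json_object_by_key text key) := by
  unfold Pre_extract_json_object_by_key; infer_instance

def pvWitness_extract_json_object_by_key : String × String := ("x{a{b}c}!", "x")

def Spec_extract_json_object_by_key (text : String) (key : String) (out : String) : Prop := out = extract_json_object_by_key_alt text key
instance (text : String) (key : String) (out : String) : Decidable (Spec_extract_json_object_by_key text key out) := by unfold Spec_extract_json_object_by_key; infer_instance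

-- ===== CLAIM (what is proved, stated in full; the proofs are below) =====
def Claim_equal_extract_json_object_by_key : Prop := ∀ (text : String) (key : String), Dom_extract_json_object_by_key text key → Pre_extract_json_object_by_key text key → Spec_extract_json_object_by_key text key (extract_json_object_by_key text key)

-- ===== LEMMAS AND PROOFS =====

-- proof-only bridge: iterating the recursive matcher d more times = the depth counter at d+1
def pvGo : Nat → List Char → Option Nat
  | 0, l => pvMatchLen l
  | d + 1, l =>
    match pvMatchLen l with
    | none => none
    | some k =>
      match pvGo d (l.drop (k + 1)) with
      | none => none
      | some m => some (k + 1 + m)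

theorem pvMatchLen_cons (c : Char) (rest : List Char) :
    pvMatchLen (c :: rest) =
      if c = '}' then some 0
      else if c = '{' then
        (pvMatchLen rest).bind fun k => (pvMatchLen (rest.drop (k + 1))).map fun k' => k + k' + 2
      else (pvMatchLen rest).map (· + 1) := by
  rw [pvMatchLen]
  by_cases h1 : c = '}' <;> by_cases h2 : c = '{' <;>
    simp only [if_pos, reduceIte, *] <;>
    cases hm : pvMatchLen rest <;> simp <;>
    cases pvMatchLen (rest.drop (_ + 1)) <;> simp

theorem pvGo_succ (d : Nat) (l : List Char) :
    pvGo (d + 1) l = (pvMatchLen l).bind fun k => (pvGo d (l.drop (k + 1))).map fun m => k + 1 + m := by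
  rw [pvGo]
  cases pvMatchLen l with
  | none => simp
  | some k => cases h : pvGo d (l.drop (k + 1)) <;> simp [h]

theorem pvLoopA_eq_pvGo (l : List Char) : ∀ d : Nat, pvLoopA l ((d : Int) + 1) = pvGo d l := by
  induction l with
  | nil => intro d; cases d <;> simp [pvLoopA, pvGo, pvMatchLen]
  | cons c rest ih =>
    intro d
    by_cases hbo : c = '{'
    · subst hbo
      have hL : pvLoopA ('{' :: rest) ((d : Int) + 1) = (pvLoopA rest ((d : Int) + 1 + 1)).map (· + 1) := by
        rw [pvLoopA]; simp
      have hcast : (d : Int) + 1 + 1 = ((d + 1 : Nat) : Int) + 1 := by push_cast; ring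
      rw [hL, hcast, ih (d + 1), pvGo_succ]
      cases d with
      | zero =>
        show _ = pvMatchLen ('{' :: rest)
        rw [pvMatchLen_cons, if_neg (by decide), if_pos rfl]
        cases hm : pvMatchLen rest with
        | none => simp
        | some k =>
          simp only [Option.bind_some]
          show Option.map _ ((pvGo 0 (rest.drop (k + 1))).map _) = _
          show Option.map _ ((pvMatchLen (rest.drop (k + 1))).map _) = _
          cases hm2 : pvMatchLen (rest.drop (k + 1)) <;> simp <;> omega
      | succ d' =>
        rw [pvGo_succ, pvMatchLen_cons, if_neg (by decide), if_pos rfl]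
        cases hm : pvMatchLen rest with
        | none => simp
        | some k =>
          simp only [Option.bind_some]
          rw [pvGo_succ]
          cases hm2 : pvMatchLen (rest.drop (k + 1)) with
          | none => simp
          | some k' =>
            simp only [Option.bind_some, Option.map_map, Option.map_some]
            have hdd : ('{' :: rest).drop (k + k' + 2 + 1) = (rest.drop (k + 1)).drop (k' + 1) := by
              simp [List.drop_drop]; congr 1; omega
            rw [hdd]
            cases pvGo d' ((rest.drop (k + 1)).drop (k' + 1)) <;> simp <;> omega
    · by_cases hbc : c = '}'
      · subst hbc
        cases d with
        | zero => simp [pvLoopA, pvGo, pvMatchLen]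
        | succ d' =>
          have hL : pvLoopA ('}' :: rest) (((d' + 1 : Nat) : Int) + 1) =
              (pvLoopA rest (((d' + 1 : Nat) : Int) + 1 - 1)).map (· + 1) := by
            rw [pvLoopA]
            rw [if_neg (by decide), if_pos rfl, if_neg (by push_cast; omega)]
          have hcast : ((d' + 1 : Nat) : Int) + 1 - 1 = ((d' : Nat) : Int) + 1 := by push_cast; ring
          rw [hL, hcast, ih d', pvGo_succ, pvMatchLen_cons, if_pos rfl]
          simp only [Option.bind_some, List.drop_succ_cons, List.drop_zero]
          cases pvGo d' rest <;> simp <;> omega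
      · have hL : pvLoopA (c :: rest) ((d : Int) + 1) = (pvLoopA rest ((d : Int) + 1)).map (· + 1) := by
          rw [pvLoopA, if_neg hbo, if_neg hbc]
        rw [hL, ih d]
        cases d with
        | zero =>
          show _ = pvMatchLen (c :: rest)
          rw [pvMatchLen_cons, if_neg hbc, if_neg hbo]
          rfl
        | succ d' =>
          rw [pvGo_succ, pvGo_succ, pvMatchLen_cons, if_neg hbc, if_neg hbo]
          cases hm : pvMatchLen rest with
          | none => simp
          | some k =>
            simp only [Option.map_some, Option.bind_some, Option.map_map, List.drop_succ_cons]
            cases pvGo d' (rest.drop (k + 1)) <;> simp <;> omega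

theorem pv_ports_agree (text key : String) :
    extract_json_object_by_key text key = extract_json_object_by_key_alt text key := by
  unfold extract_json_object_by_key extract_json_object_by_key_alt
  dsimp only
  generalize text.toList = cs
  generalize key.toList = kl
  generalize hidx : PySem.Chars.find cs kl = idx
  by_cases h1 : idx = -1
  · simp [h1]
  · rw [if_neg h1, if_neg h1]
    generalize hbr : PySem.Chars.findFrom cs ['{'] idx none = brace
    by_cases h2 : brace = -1
    · simp [h2]
    · rw [if_neg h2, if_neg h2]
      have hidx0 : 0 ≤ idx := by
        have := PySem.Chars.neg_one_le_find cs kl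
        rw [hidx] at this; omega
      have hidxlen : idx.toNat ≤ cs.length := by
        have := PySem.Chars.find_le_length cs kl
        rw [hidx] at this; omega
      have hcast : ((idx.toNat : Nat) : Int) = idx := Int.toNat_of_nonneg hidx0
      have hne : PySem.Chars.findFrom cs ['{'] ((idx.toNat : Nat) : Int) none ≠ -1 := by
        rw [hcast, hbr]; exact h2
      have hspec := PySem.Chars.findFrom_natCast_spec cs ['{'] idx.toNat hidxlen hne
      rw [hcast, hbr] at hspec
      obtain ⟨-, hpre, -⟩ := hspec
      obtain ⟨t, ht⟩ := hpre
      have hdrop : cs.drop brace.toNat = '{' :: t := by simpa using ht.symm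
      have ht' : t = cs.drop (brace.toNat + 1) := by
        have htail : ('{' :: t).tail = cs.drop (brace.toNat + 1) := by
          rw [← hdrop, ← List.drop_drop]; simp
        simpa using htail
      have hloop : pvLoopA (cs.drop brace.toNat) 0 =
          (pvMatchLen (cs.drop (brace.toNat + 1))).map (· + 1) := by
        rw [hdrop, ht']
        show pvLoopA ('{' :: cs.drop (brace.toNat + 1)) 0 = _
        rw [pvLoopA, if_pos rfl]
        have hgo := pvLoopA_eq_pvGo (cs.drop (brace.toNat + 1)) 0
        rw [show ((0 : Nat) : Int) + 1 = (0 : Int) + 1 by norm_num] at hgo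
        rw [hgo]
        rfl
      rw [hloop]
      cases hm : pvMatchLen (cs.drop (brace.toNat + 1)) with
      | none => simp
      | some k =>
        simp only [Option.map_some]
        congr 3
        push_cast; ring

-- ===== VERDICT (by name: the statement is the Claim_ definition above) =====
theorem extract_json_object_by_key_spec : Claim_equal_extract_json_object_by_key := by
  intro text key _ _
  unfold Spec_extract_json_object_by_key
  exact pv_ports_agree text key
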